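-- pv_equiv track=rewrite | github.com/jwlee-collab/krx-stock | scripts/analyze_sector_attribution.py | _full_period_run_ids
-- ===== SOURCE A (Python) =====
-- from typing import Any
--
-- CANDIDATES = ["baseline_old", "aggressive_hybrid_v4"]
--
-- def _full_period_run_ids(full_rows: list[dict[str, str]], manifest: dict[str, Any]) -> dict[str, str | None]:
--     out = {candidate: None for candidate in CANDIDATES}
--     for row in full_rows:
--         candidate = row.get("candidate")
--         if candidate in out and row.get("run_id"):
--             out[candidate] = str(row["run_id"])
--     manifest_map = manifest.get("full_period_run_ids") or {}
--     for candidate in CANDIDATES: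
--         if out[candidate] is None and manifest_map.get(candidate):
--             out[candidate] = str(manifest_map[candidate])
--     return out
-- ===== SOURCE B (Python) =====
-- from typing import Any
--
-- CANDIDATES = ["baseline_old", "aggressive_hybrid_v4"]
--
-- def _full_period_run_ids(full_rows: list[dict[str, str]], manifest: dict[str, Any]) -> dict[str, str | None]:
--     result = {
--         c: next((str(r["run_id"]) for r in reversed(full_rows)
--                  if r.get("candidate") == c and r.get("run_id")), None)
--         for c in CANDIDATES
--     }
--     manifest_map = manifest.get("full_period_run_ids") or {}
--     return {c: (str(manifest_map[c]) if v is None and manifest_map.get(c) else v)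
--             for c, v in result.items()}
-- ===== Notes on version B (the rewrite author's own statement) =====
-- stated objective: alternative
-- what changed: Replaces the single accumulate-over-all-rows dict pass by an independent per-candidate backward scan (next over reversed(full_rows)) in a dict comprehension, with the manifest fallback applied in a second comprehension only to unresolved candidates.
import Mathlib
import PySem

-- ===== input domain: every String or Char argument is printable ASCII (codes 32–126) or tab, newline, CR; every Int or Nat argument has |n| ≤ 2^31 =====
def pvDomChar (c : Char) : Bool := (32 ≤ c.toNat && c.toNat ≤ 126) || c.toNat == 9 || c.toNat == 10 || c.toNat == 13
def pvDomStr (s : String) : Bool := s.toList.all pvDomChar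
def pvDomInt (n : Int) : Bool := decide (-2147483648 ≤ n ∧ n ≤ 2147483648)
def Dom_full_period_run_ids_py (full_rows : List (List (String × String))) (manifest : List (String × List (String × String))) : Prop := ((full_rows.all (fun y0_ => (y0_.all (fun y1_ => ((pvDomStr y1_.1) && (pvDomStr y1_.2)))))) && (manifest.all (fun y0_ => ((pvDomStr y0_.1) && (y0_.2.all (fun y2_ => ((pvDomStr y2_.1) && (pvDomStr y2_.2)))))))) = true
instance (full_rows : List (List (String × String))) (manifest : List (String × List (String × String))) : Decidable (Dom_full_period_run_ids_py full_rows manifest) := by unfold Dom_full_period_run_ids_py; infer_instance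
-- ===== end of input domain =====

-- B replaces A's single accumulating pass over all rows by an independent per-candidate
-- backward scan plus a per-candidate manifest fallback (different decomposition, same cost).

-- ===== PORT A =====
-- module constant CANDIDATES
def fpriCandidates : List String := ["baseline_old", "aggressive_hybrid_v4"]

-- row.get(k) on an association list (first match, exact Python dict.get)
def fpriRowGet? (row : List (String × String)) (k : String) : Option String :=
  (row.find? (fun p => p.1 == k)).map (·.2)

-- the body of A's 'for row in full_rows' loop
def fpriStep (out : PySem.Dict String (Option String)) (row : List (String × String)) :
    PySem.Dict String (Option String) :=
  match fpriRowGet? row "candidate" with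
  | none => out
  | some c =>
      if out.contains c && ((fpriRowGet? row "run_id").getD "" != "") then
        out.insert c (some ((fpriRowGet? row "run_id").getD ""))
      else out

def full_period_run_ids_py (full_rows : List (List (String × String))) (manifest : List (String × List (String × String))) : List (String × Option String) :=
  let out0 : PySem.Dict String (Option String) :=
    fpriCandidates.foldl (fun d c => d.insert c none) PySem.Dict.empty
  let out1 := full_rows.foldl fpriStep out0
  let manifest_map : List (String × String) :=
    match (manifest.find? (fun p => p.1 == "full_period_run_ids")).map (·.2) with
    | some m => if m.isEmpty then [] else m   -- 'or {}'
    | none => []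
  let out2 := fpriCandidates.foldl (fun d c =>
      if (d.getD c none).isNone && ((fpriRowGet? manifest_map c).getD "" != "") then
        d.insert c (some ((fpriRowGet? manifest_map c).getD ""))
      else d) out1
  out2.items

-- ===== PORT B =====
def full_period_run_ids_py_alt (full_rows : List (List (String × String))) (manifest : List (String × List (String × String))) : List (String × Option String) :=
  let result : List (String × Option String) :=
    fpriCandidates.map (fun c =>
      (c, (full_rows.reverse.find? (fun r =>
             ((r.find? (fun p => p.1 == "candidate")).map (·.2) == some c) &&
             (((r.find? (fun p => p.1 == "run_id")).map (·.2)).getD "" != ""))).map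
           (fun r => ((r.find? (fun p => p.1 == "run_id")).map (·.2)).getD "")))
  let manifest_map : List (String × String) :=
    match (manifest.find? (fun p => p.1 == "full_period_run_ids")).map (·.2) with
    | some m => if m.isEmpty then [] else m
    | none => []
  result.map (fun cv =>
    if cv.2.isNone && (((manifest_map.find? (fun p => p.1 == cv.1)).map (·.2)).getD "" != "")
    then (cv.1, some (((manifest_map.find? (fun p => p.1 == cv.1)).map (·.2)).getD ""))
    else cv)

-- ===== PRECONDITION & SPEC =====
def Spec_full_period_run_ids_py (full_rows : List (List (String × String))) (manifest : List (String × List (String × String))) (out : List (String × Option String)) : Prop := out = full_period_run_ids_py_alt full_rows manifest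
instance (full_rows : List (List (String × String))) (manifest : List (String × List (String × String))) (out : List (String × Option String)) : Decidable (Spec_full_period_run_ids_py full_rows manifest out) := by unfold Spec_full_period_run_ids_py; infer_instance

-- ===== CLAIM (what is proved, stated in full; the proofs are below) =====
def Claim_equal_full_period_run_ids_py : Prop := ∀ (full_rows : List (List (String × String))) (manifest : List (String × List (String × String))), Dom_full_period_run_ids_py full_rows manifest → Spec_full_period_run_ids_py full_rows manifest (full_period_run_ids_py full_rows manifest)

-- ===== LEMMAS AND PROOFS =====

-- proof-only helpers: the per-row predicate / extracted run_id used by B's scan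
def fpriPred (c : String) (r : List (String × String)) : Bool :=
  (fpriRowGet? r "candidate" == some c) && ((fpriRowGet? r "run_id").getD "" != "")

def fpriRid (r : List (String × String)) : String := (fpriRowGet? r "run_id").getD ""

-- value of candidate c after A's row loop, starting from value v
def fpriRes (rows : List (List (String × String))) (v : Option String) (c : String) : Option String :=
  match rows.reverse.find? (fpriPred c) with
  | some r => some (fpriRid r)
  | none => v

theorem fpriRes_cons (row : List (String × String)) (rows : List (List (String × String)))
    (v : Option String) (c : String) :
    fpriRes (row :: rows) v c =
      fpriRes rows (if fpriPred c row then some (fpriRid row) else v) c := by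
  unfold fpriRes
  rw [List.reverse_cons, List.find?_append]
  cases h : rows.reverse.find? (fpriPred c) <;> cases hp : fpriPred c row <;>
    simp [List.find?, hp]

theorem fpriStep_eq (v1 v2 : Option String) (row : List (String × String)) :
    fpriStep (PySem.Dict.mk [("baseline_old", v1), ("aggressive_hybrid_v4", v2)]) row =
      PySem.Dict.mk [("baseline_old", if fpriPred "baseline_old" row then some (fpriRid row) else v1),
        ("aggressive_hybrid_v4", if fpriPred "aggressive_hybrid_v4" row then some (fpriRid row) else v2)] := by
  unfold fpriStep fpriPred fpriRid
  cases hc : fpriRowGet? row "candidate" with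
  | none => simp
  | some c =>
      by_cases ht : ((fpriRowGet? row "run_id").getD "" != "") = true
      · by_cases h1 : c = "baseline_old"
        · subst h1
          apply PySem.Dict.ext
          simp [PySem.Dict.items_insert_of_contains, ht]
        · by_cases h2 : c = "aggressive_hybrid_v4"
          · subst h2
            apply PySem.Dict.ext
            simp [PySem.Dict.items_insert_of_contains, ht]
          · have hcf : (PySem.Dict.mk [("baseline_old", v1), ("aggressive_hybrid_v4", v2)]).contains c = false := by
              simp only [PySem.Dict.contains_mk]
              simp
              exact ⟨Ne.symm h1, Ne.symm h2⟩
            simp [hcf, h1, h2]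
      · simp only [Bool.not_eq_true] at ht
        simp [ht]

theorem fpriFold_eq (rows : List (List (String × String))) :
    ∀ (v1 v2 : Option String),
      rows.foldl fpriStep (PySem.Dict.mk [("baseline_old", v1), ("aggressive_hybrid_v4", v2)]) =
        PySem.Dict.mk [("baseline_old", fpriRes rows v1 "baseline_old"),
          ("aggressive_hybrid_v4", fpriRes rows v2 "aggressive_hybrid_v4")] := by
  induction rows with
  | nil => intro v1 v2; rfl
  | cons row rows ih =>
      intro v1 v2
      rw [List.foldl_cons, fpriStep_eq, ih, fpriRes_cons, fpriRes_cons]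

theorem fpriRes_none (rows : List (List (String × String))) (c : String) :
    fpriRes rows none c = (rows.reverse.find? (fpriPred c)).map fpriRid := by
  unfold fpriRes; cases rows.reverse.find? (fpriPred c) <;> simp

-- the two manifest-fallback passes agree, for any resolved values w1 w2 and manifest map
theorem fpriFinale (w1 w2 : Option String) (mmap : List (String × String)) :
    (fpriCandidates.foldl (fun d c =>
        if (d.getD c none).isNone && ((fpriRowGet? mmap c).getD "" != "") then
          d.insert c (some ((fpriRowGet? mmap c).getD ""))
        else d)
      (PySem.Dict.mk [("baseline_old", w1), ("aggressive_hybrid_v4", w2)])).items =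
    ([("baseline_old", w1), ("aggressive_hybrid_v4", w2)] : List (String × Option String)).map (fun cv =>
      if cv.2.isNone && (((mmap.find? (fun p => p.1 == cv.1)).map (·.2)).getD "" != "")
      then (cv.1, some (((mmap.find? (fun p => p.1 == cv.1)).map (·.2)).getD ""))
      else cv) := by
  have hget : ∀ c, (mmap.find? (fun p => p.1 == c)).map (·.2) = fpriRowGet? mmap c := fun _ => rfl
  simp only [fpriCandidates, List.foldl, List.map, hget]
  by_cases h1 : (w1.isNone && ((fpriRowGet? mmap "baseline_old").getD "" != "")) = true
  · rw [show (PySem.Dict.mk [("baseline_old", w1), ("aggressive_hybrid_v4", w2)]).getD "baseline_old" none = w1 from rfl]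
    rw [if_pos h1]
    have hins : (PySem.Dict.mk [("baseline_old", w1), ("aggressive_hybrid_v4", w2)]).insert "baseline_old"
        (some ((fpriRowGet? mmap "baseline_old").getD "")) =
        PySem.Dict.mk [("baseline_old", some ((fpriRowGet? mmap "baseline_old").getD "")), ("aggressive_hybrid_v4", w2)] := by
      apply PySem.Dict.ext
      rw [PySem.Dict.items_insert_of_contains _ _ (by simp)]
      simp
    rw [hins]
    by_cases h2 : (w2.isNone && ((fpriRowGet? mmap "aggressive_hybrid_v4").getD "" != "")) = true
    · rw [show ((PySem.Dict.mk [("baseline_old", some ((fpriRowGet? mmap "baseline_old").getD "")), ("aggressive_hybrid_v4", w2)]).getD "aggressive_hybrid_v4" none) = w2 from rfl]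
      rw [if_pos h2]
      rw [PySem.Dict.items_insert_of_contains _ _ (by simp)]
      simp [h1, h2]
    · rw [show ((PySem.Dict.mk [("baseline_old", some ((fpriRowGet? mmap "baseline_old").getD "")), ("aggressive_hybrid_v4", w2)]).getD "aggressive_hybrid_v4" none) = w2 from rfl]
      rw [if_neg h2]
      simp [h1, h2]
  · rw [show (PySem.Dict.mk [("baseline_old", w1), ("aggressive_hybrid_v4", w2)]).getD "baseline_old" none = w1 from rfl]
    rw [if_neg h1]
    by_cases h2 : (w2.isNone && ((fpriRowGet? mmap "aggressive_hybrid_v4").getD "" != "")) = true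
    · rw [show ((PySem.Dict.mk [("baseline_old", w1), ("aggressive_hybrid_v4", w2)]).getD "aggressive_hybrid_v4" none) = w2 from rfl]
      rw [if_pos h2]
      rw [PySem.Dict.items_insert_of_contains _ _ (by simp)]
      simp [h1, h2]
    · rw [show ((PySem.Dict.mk [("baseline_old", w1), ("aggressive_hybrid_v4", w2)]).getD "aggressive_hybrid_v4" none) = w2 from rfl]
      rw [if_neg h2]
      simp [h1, h2]

-- ===== VERDICT (by name: the statement is the Claim_ definition above) =====
theorem full_period_run_ids_py_spec : Claim_equal_full_period_run_ids_py := by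
  intro full_rows manifest _
  unfold Spec_full_period_run_ids_py full_period_run_ids_py full_period_run_ids_py_alt
  have h0 : fpriCandidates.foldl (fun d c => d.insert c none) PySem.Dict.empty =
      PySem.Dict.mk [("baseline_old", (none : Option String)), ("aggressive_hybrid_v4", none)] := by decide
  simp only [h0, fpriFold_eq, fpriRes_none]
  rw [fpriFinale]
  rfl
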